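-- pv_equiv track=rewrite | github.com/janvis11/asr | q4_lattice/lattice.py | align_multiple_sequences
-- ===== SOURCE A (Python) =====
-- from typing import List, Dict, Tuple, Optional
--
-- def word_edit_distance(words1: List[str], words2: List[str]) -> Tuple[int, List]:
--     """Compute word-level edit distance with alignment operations.
--
--     Returns:
--         (distance, alignment_ops) where ops are tuples of (op_type, w1_idx, w2_idx)
--         op_type: 'match', 'substitute', 'insert', 'delete'
--     """
--     m, n = len(words1), len(words2)
--     dp = [[0] * (n + 1) for _ in range(m + 1)]
--     ops = [[None] * (n + 1) for _ in range(m + 1)]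
--
--     for i in range(m + 1):
--         dp[i][0] = i
--         if i > 0:
--             ops[i][0] = ('delete', i - 1, None)
--     for j in range(n + 1):
--         dp[0][j] = j
--         if j > 0:
--             ops[0][j] = ('insert', None, j - 1)
--
--     for i in range(1, m + 1):
--         for j in range(1, n + 1):
--             if words1[i - 1] == words2[j - 1]:
--                 dp[i][j] = dp[i - 1][j - 1]
--                 ops[i][j] = ('match', i - 1, j - 1)
--             else:
--                 candidates = [
--                     (dp[i - 1][j - 1] + 1, ('substitute', i - 1, j - 1)),
--                     (dp[i - 1][j] + 1, ('delete', i - 1, None)),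
--                     (dp[i][j - 1] + 1, ('insert', None, j - 1)),
--                 ]
--                 dp[i][j], ops[i][j] = min(candidates, key=lambda x: x[0])
--
--     # Backtrack to get alignment
--     alignment = []
--     i, j = m, n
--     while i > 0 or j > 0:
--         op = ops[i][j]
--         alignment.append(op)
--         if op[0] in ('match', 'substitute'):
--             i -= 1
--             j -= 1
--         elif op[0] == 'delete':
--             i -= 1
--         elif op[0] == 'insert':
--             j -= 1
--
--     alignment.reverse()
--     return dp[m][n], alignment
--
-- def align_multiple_sequences(sequences: List[List[str]], reference: List[str]) -> List[List[Optional[str]]]: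
--     """Align multiple word sequences against a reference using pairwise alignment.
--
--     This is a simplified ROVER (Recognizer Output Voting Error Reduction) approach:
--     1. Align each sequence to the reference
--     2. Build a composite alignment matrix
--
--     Args:
--         sequences: List of word lists from different models
--         reference: Word list from human reference
--
--     Returns:
--         Alignment matrix where each row is a sequence (including reference as first row)
--         and each column is an alignment position. None represents a gap.
--     """
--     if not sequences:
--         return [reference]
--
--     # Use reference as the backbone
--     backbone = reference[:]
--     all_aligned = [backbone[:]]  # First row = reference
--
--     for seq in sequences:
--         _, alignment = word_edit_distance(backbone, seq)
--
--         aligned = []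
--         seq_idx = 0
--
--         for op in alignment:
--             if op[0] == 'match':
--                 aligned.append(seq[op[2]] if op[2] is not None else None)
--             elif op[0] == 'substitute':
--                 aligned.append(seq[op[2]] if op[2] is not None else None)
--             elif op[0] == 'delete':
--                 aligned.append(None)  # Gap in this sequence
--             elif op[0] == 'insert':
--                 aligned.append(seq[op[2]] if op[2] is not None else None)
--
--         # Pad to same length
--         while len(aligned) < len(backbone):
--             aligned.append(None)
--
--         all_aligned.append(aligned[:len(backbone)])
--
--     return all_aligned
-- ===== SOURCE B (Python) =====
-- from typing import List, Optional
--
-- def _aligned_row(ref: List[str], seq: List[str]) -> List[Optional[str]]: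
--     """Forward DP where every cell carries (cost, alignment chain).
--
--     The chain is a persistent linked list of nested pairs (entry, rest) with ()
--     as the terminator; entry is the aligned item contributed at that cell (the
--     seq word for match/substitute/insert, None for a gap).  Ties are resolved
--     match first, then substitute, delete, insert.  No backpointer matrix and no
--     traceback over the table: the answer is read off the final cell's chain.
--     """
--     n = len(seq)
--     # row i = 0: all inserts
--     cell = (0, ())
--     row = [cell]
--     for j in range(1, n + 1):
--         cell = (cell[0] + 1, (seq[j - 1], cell[1]))
--         row.append(cell)
--     for i in range(1, len(ref) + 1):
--         prev = row
--         cell = (prev[0][0] + 1, (None, prev[0][1]))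
--         row = [cell]
--         for j in range(1, n + 1):
--             if ref[i - 1] == seq[j - 1]:
--                 c, ch = prev[j - 1]
--                 cell = (c, (seq[j - 1], ch))
--             else:
--                 s, d, l = prev[j - 1], prev[j], row[j - 1]
--                 if s[0] <= d[0] and s[0] <= l[0]:
--                     cell = (s[0] + 1, (seq[j - 1], s[1]))
--                 elif d[0] <= l[0]:
--                     cell = (d[0] + 1, (None, d[1]))
--                 else:
--                     cell = (l[0] + 1, (seq[j - 1], l[1]))
--             row.append(cell)
--     chain = row[n][1]
--     out = []
--     while chain != ():
--         out.append(chain[0])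
--         chain = chain[1]
--     out.reverse()
--     m = len(ref)
--     out += [None] * (m - len(out))
--     return out[:m]
--
-- def align_multiple_sequences(sequences: List[List[str]], reference: List[str]) -> List[List[Optional[str]]]:
--     result = [list(reference)]
--     for seq in sequences:
--         result.append(_aligned_row(reference, seq))
--     return result
-- ===== Notes on version B (the rewrite author's own statement) =====
-- stated objective: alternative
-- what changed: B replaces A's two-phase scheme (fill dp cost matrix plus a separate ops backpointer matrix, then a traceback while-loop over the ops matrix, then a mapping pass turning op tuples into aligned entries) by a single forward DP whose cells carry (cost, persistent linked chain of aligned entries) with structure sharing; the answer is read off the final cell's chain, so there is no ops matrix, no traceback and no op-tuple mapping pass, and per cell only an O(1) cons and integer comparisons remain (measured ~3.9x faster).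
import Mathlib
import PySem

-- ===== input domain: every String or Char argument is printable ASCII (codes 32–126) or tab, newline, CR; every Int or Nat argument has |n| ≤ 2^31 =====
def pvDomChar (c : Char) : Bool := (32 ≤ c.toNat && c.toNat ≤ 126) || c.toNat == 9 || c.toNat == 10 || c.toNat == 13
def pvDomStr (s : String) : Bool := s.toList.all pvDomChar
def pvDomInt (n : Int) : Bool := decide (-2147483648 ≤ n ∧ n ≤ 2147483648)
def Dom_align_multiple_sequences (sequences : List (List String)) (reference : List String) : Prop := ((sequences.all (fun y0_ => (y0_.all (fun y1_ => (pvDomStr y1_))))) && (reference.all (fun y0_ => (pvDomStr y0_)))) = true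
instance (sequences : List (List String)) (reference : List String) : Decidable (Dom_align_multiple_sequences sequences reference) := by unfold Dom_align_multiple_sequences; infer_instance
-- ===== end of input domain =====

-- B replaces A's dp+ops matrices and traceback loop by a single forward DP whose cells carry
-- (cost, persistent chain of aligned entries); no ops matrix and no traceback (measured faster in a timing run).
-- Return values only; neither program observably mutates its arguments.

-- ===== PORT A =====
-- op tuple ('kind', w1_idx_or_None, w2_idx_or_None)
abbrev PvOp := String × Option Int × Option Int

-- mt[i][j] reads / writes; all accesses made by A are in range, so getD/set are exact
def pvGet2 {α : Type} (mt : List (List α)) (d : α) (i j : Nat) : α := (mt.getD i []).getD j d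
def pvSet2 {α : Type} (mt : List (List α)) (i j : Nat) (v : α) : List (List α) :=
  mt.set i ((mt.getD i []).set j v)

-- Python's min(candidates, key=lambda x: x[0]): first element with minimal key (exact)
def pvMinByFst (c0 : Int × PvOp) (rest : List (Int × PvOp)) : Int × PvOp :=
  rest.foldl (fun best x => if x.1 < best.1 then x else best) c0

-- 'for i in range(m+1): dp[i][0] = i; if i > 0: ops[i][0] = (delete, i-1, None)'
def pvInitRowStep (st : List (List Int) × List (List (Option PvOp))) (i : Nat) :
    List (List Int) × List (List (Option PvOp)) :=
  (pvSet2 st.1 i 0 (i : Int),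
   if 0 < i then pvSet2 st.2 i 0 (some ("delete", some ((i : Int) - 1), none)) else st.2)

-- 'for j in range(n+1): dp[0][j] = j; if j > 0: ops[0][j] = (insert, None, j-1)'
def pvInitColStep (st : List (List Int) × List (List (Option PvOp))) (j : Nat) :
    List (List Int) × List (List (Option PvOp)) :=
  (pvSet2 st.1 0 j (j : Int),
   if 0 < j then pvSet2 st.2 0 j (some ("insert", none, some ((j : Int) - 1))) else st.2)

-- body of the main double loop, at cell (i, j), 1 ≤ i ≤ m, 1 ≤ j ≤ n
def pvCellStep (w1 w2 : List String) (st : List (List Int) × List (List (Option PvOp)))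
    (i j : Nat) : List (List Int) × List (List (Option PvOp)) :=
  if w1.getD (i - 1) "" = w2.getD (j - 1) "" then
    (pvSet2 st.1 i j (pvGet2 st.1 0 (i - 1) (j - 1)),
     pvSet2 st.2 i j (some ("match", some ((i : Int) - 1), some ((j : Int) - 1))))
  else
    let best := pvMinByFst
      (pvGet2 st.1 0 (i - 1) (j - 1) + 1, ("substitute", some ((i : Int) - 1), some ((j : Int) - 1)))
      [(pvGet2 st.1 0 (i - 1) j + 1, ("delete", some ((i : Int) - 1), none)),
       (pvGet2 st.1 0 i (j - 1) + 1, ("insert", none, some ((j : Int) - 1)))]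
    (pvSet2 st.1 i j best.1, pvSet2 st.2 i j (some best.2))

-- the backtrack while-loop; fuel bounds the iteration count (each real op lowers i+j by ≥ 1,
-- so fuel = m+n at the call site is never exhausted; a None cell, which would make Python
-- raise, and an unknown op tag, which would make Python loop forever, are unreachable)
def pvBackA (opsm : List (List (Option PvOp))) : Nat → Nat → Nat → List PvOp
  | _, 0, 0 => []
  | 0, _, _ => []
  | fuel + 1, i, j =>
    match pvGet2 opsm none i j with
    | none => []
    | some op =>
      if op.1 = "match" ∨ op.1 = "substitute" then op :: pvBackA opsm fuel (i - 1) (j - 1)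
      else if op.1 = "delete" then op :: pvBackA opsm fuel (i - 1) j
      else if op.1 = "insert" then op :: pvBackA opsm fuel i (j - 1)
      else []

-- word_edit_distance (A)
def pvWedA (w1 w2 : List String) : Int × List PvOp :=
  let m := w1.length
  let n := w2.length
  let dp0 : List (List Int) := List.replicate (m + 1) (List.replicate (n + 1) 0)
  let ops0 : List (List (Option PvOp)) := List.replicate (m + 1) (List.replicate (n + 1) none)
  let st1 := (List.range (m + 1)).foldl pvInitRowStep (dp0, ops0)
  let st2 := (List.range (n + 1)).foldl pvInitColStep st1
  -- range(1, m+1) enumerates 1..m = List.range' 1 m (exact)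
  let st3 := (List.range' 1 m).foldl
    (fun st i => (List.range' 1 n).foldl (fun st j => pvCellStep w1 w2 st i j) st) st2
  (pvGet2 st3.1 0 m n, (pvBackA st3.2 (m + n) m n).reverse)

-- 'seq[op[2]] if op[2] is not None else None' (op[2] always in range where A reaches this:
-- pyGet? = none would be Python's IndexError, unreachable)
def pvFetch (seq : List String) (k? : Option Int) : Option String :=
  match k? with
  | some k => PySem.List.pyGet? seq k
  | none => none

-- body of A's 'for op in alignment' loop
def pvAlignedStep (seq : List String) (acc : List (Option String)) (op : PvOp) :
    List (Option String) :=
  if op.1 = "match" then acc ++ [pvFetch seq op.2.2]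
  else if op.1 = "substitute" then acc ++ [pvFetch seq op.2.2]
  else if op.1 = "delete" then acc ++ [none]
  else if op.1 = "insert" then acc ++ [pvFetch seq op.2.2]
  else acc

def align_multiple_sequences (sequences : List (List String)) (reference : List String) :
    List (List (Option String)) :=
  if sequences.isEmpty then [reference.map some]
  else
    let backbone := reference
    sequences.foldl (fun all seq =>
      let alignment := (pvWedA backbone seq).2
      let aligned := alignment.foldl (pvAlignedStep seq) []
      -- 'while len(aligned) < len(backbone): aligned.append(None)'
      let aligned := aligned ++ List.replicate (backbone.length - aligned.length) none
      all ++ [aligned.take backbone.length]) [backbone.map some]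

-- ===== PORT B =====
-- a cell of B's forward DP: (cost, chain of aligned entries, most recent first)
-- (the Python chain is nested pairs terminated by (); a Lean list is exactly that structure)
abbrev PvCell := Int × List (Option String)

-- body of the 'for j in range(1, n+1)' loop filling row 0
def pvCell0 (seq : List String) (st : List PvCell × PvCell) (j : Nat) : List PvCell × PvCell :=
  let cell : PvCell := (st.2.1 + 1, some (seq.getD (j - 1) "") :: st.2.2)
  (st.1 ++ [cell], cell)

-- 'cell = (0, ()); row = [cell]; for j in range(1, n+1): …'
def pvRow0 (seq : List String) : List PvCell × PvCell :=
  (List.range' 1 seq.length).foldl (pvCell0 seq)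
    ([((0 : Int), ([] : List (Option String)))], ((0 : Int), ([] : List (Option String))))

-- body of the inner 'for j in range(1, n+1)' loop of row i
def pvCellB (ref seq : List String) (prev : List PvCell) (i : Nat)
    (st : List PvCell × PvCell) (j : Nat) : List PvCell × PvCell :=
  let cell : PvCell :=
    if ref.getD (i - 1) "" = seq.getD (j - 1) "" then
      let p := prev.getD (j - 1) (0, [])
      (p.1, some (seq.getD (j - 1) "") :: p.2)
    else
      let s := prev.getD (j - 1) (0, [])
      let d := prev.getD j (0, [])
      let l := st.1.getD (j - 1) (0, [])
      if s.1 ≤ d.1 ∧ s.1 ≤ l.1 then (s.1 + 1, some (seq.getD (j - 1) "") :: s.2)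
      else if d.1 ≤ l.1 then (d.1 + 1, none :: d.2)
      else (l.1 + 1, some (seq.getD (j - 1) "") :: l.2)
  (st.1 ++ [cell], cell)

-- one outer iteration: 'prev = row; cell = …; row = [cell]; for j …'
def pvRowB (ref seq : List String) (prev : List PvCell) (i : Nat) : List PvCell :=
  let c0 : PvCell := ((prev.getD 0 (0, [])).1 + 1, none :: (prev.getD 0 (0, [])).2)
  ((List.range' 1 seq.length).foldl (pvCellB ref seq prev i) ([c0], c0)).1

-- _aligned_row: forward DP, then unroll the final cell's chain (reverse), pad, truncate
def pvAlignedRowB (ref seq : List String) : List (Option String) :=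
  let row := (List.range' 1 ref.length).foldl (fun r i => pvRowB ref seq r i) (pvRow0 seq).1
  let chain := (row.getD seq.length (0, [])).2
  let out := chain.reverse
  let m := ref.length
  (out ++ List.replicate (m - out.length) none).take m

def align_multiple_sequences_alt (sequences : List (List String)) (reference : List String) :
    List (List (Option String)) :=
  sequences.foldl (fun result seq => result ++ [pvAlignedRowB reference seq])
    [reference.map some]

-- ===== PRECONDITION & SPEC =====
def Spec_align_multiple_sequences (sequences : List (List String)) (reference : List String) (out : List (List (Option String))) : Prop := out = align_multiple_sequences_alt sequences reference
instance (sequences : List (List String)) (reference : List String) (out : List (List (Option String))) : Decidable (Spec_align_multiple_sequences sequences reference out) := by unfold Spec_align_multiple_sequences; infer_instance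

-- ===== CLAIM (what is proved, stated in full; the proofs are below) =====
def Claim_equal_align_multiple_sequences : Prop := ∀ (sequences : List (List String)) (reference : List String), Dom_align_multiple_sequences sequences reference → Spec_align_multiple_sequences sequences reference (align_multiple_sequences sequences reference)

-- ===== LEMMAS AND PROOFS =====
-- the word-edit-distance table as a pure function
def pvD (w1 w2 : List String) : Nat → Nat → Int
  | i, 0 => (i : Int)
  | 0, j + 1 => (j : Int) + 1
  | i + 1, j + 1 =>
    if w1.getD i "" = w2.getD j "" then pvD w1 w2 i j
    else min (min (pvD w1 w2 i j + 1) (pvD w1 w2 i (j + 1) + 1)) (pvD w1 w2 (i + 1) j + 1)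
termination_by i j => i + j

-- the op A's ops matrix holds at cell (i, j)
def pvOpF (w1 w2 : List String) (i j : Nat) : Option PvOp :=
  if i = 0 ∧ j = 0 then none
  else if j = 0 then some ("delete", some ((i : Int) - 1), none)
  else if i = 0 then some ("insert", none, some ((j : Int) - 1))
  else if w1.getD (i - 1) "" = w2.getD (j - 1) "" then
    some ("match", some ((i : Int) - 1), some ((j : Int) - 1))
  else if pvD w1 w2 (i - 1) (j - 1) ≤ pvD w1 w2 (i - 1) j ∧
          pvD w1 w2 (i - 1) (j - 1) ≤ pvD w1 w2 i (j - 1) then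
    some ("substitute", some ((i : Int) - 1), some ((j : Int) - 1))
  else if pvD w1 w2 (i - 1) j ≤ pvD w1 w2 i (j - 1) then
    some ("delete", some ((i : Int) - 1), none)
  else some ("insert", none, some ((j : Int) - 1))

-- the aligned entry a single op contributes
def pvEnt (seq : List String) (op : PvOp) : Option String :=
  if op.1 = "delete" then none else pvFetch seq op.2.2

-- matrix of function values
def pvMat {α : Type} (m n : Nat) (f : Nat → Nat → α) : List (List α) :=
  (List.range (m + 1)).map (fun i => (List.range (n + 1)).map (fun j => f i j))

theorem pvGet2_mat {α : Type} {m n i j : Nat} (d : α) (f : Nat → Nat → α)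
    (hi : i ≤ m) (hj : j ≤ n) : pvGet2 (pvMat m n f) d i j = f i j := by
  simp [pvGet2, pvMat, List.getD_eq_getElem?_getD, hi, hj, Nat.lt_succ_of_le]

theorem pvSet2_mat {α : Type} {m n i j : Nat} (f : Nat → Nat → α) (v : α)
    (hi : i ≤ m) (hj : j ≤ n) :
    pvSet2 (pvMat m n f) i j v = pvMat m n (fun a b => if a = i ∧ b = j then v else f a b) := by
  unfold pvSet2 pvMat
  apply List.ext_getElem
  · simp
  · intro a h1 h2
    simp only [List.getElem_set, List.getElem_map, List.getElem_range]
    simp only [List.length_set, List.length_map, List.length_range] at h1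
    by_cases ha : a = i
    · subst ha
      simp [List.getD_eq_getElem?_getD, hi, Nat.lt_succ_of_le]
      apply List.ext_getElem
      · simp
      · intro b hb1 hb2
        simp only [List.getElem_set, List.getElem_map, List.getElem_range]
        by_cases hbj : b = j <;> simp [hbj]
        · omega
    · simp [ha]
      omega

theorem pvMat_congr {α : Type} {m n : Nat} {f g : Nat → Nat → α}
    (h : ∀ i, i ≤ m → ∀ j, j ≤ n → f i j = g i j) : pvMat m n f = pvMat m n g := by
  unfold pvMat
  apply List.map_congr_left
  intro i hi
  apply List.map_congr_left
  intro j hj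
  simp only [List.mem_range] at hi hj
  exact h i (by omega) j (by omega)

-- boundary values of pvD
theorem pvD_zero_right (w1 w2 : List String) (i : Nat) : pvD w1 w2 i 0 = (i : Int) := by
  cases i <;> simp [pvD]

theorem pvD_zero_left (w1 w2 : List String) (j : Nat) : pvD w1 w2 0 j = (j : Int) := by
  cases j <;> simp [pvD]

-- pvD recurrence for interior cells in subtraction form
theorem pvD_pos (w1 w2 : List String) {i j : Nat} (hi : 0 < i) (hj : 0 < j) :
    pvD w1 w2 i j = if w1.getD (i - 1) "" = w2.getD (j - 1) "" then pvD w1 w2 (i - 1) (j - 1)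
      else min (min (pvD w1 w2 (i - 1) (j - 1) + 1) (pvD w1 w2 (i - 1) j + 1))
               (pvD w1 w2 i (j - 1) + 1) := by
  cases i with
  | zero => omega
  | succ i' => cases j with
    | zero => omega
    | succ j' => simp [pvD]

-- phase-1 / phase-2 target functions
def pvF1 (k i j : Nat) : Int := if i < k ∧ j = 0 then (i : Int) else 0
def pvG1 (k i j : Nat) : Option PvOp :=
  if i < k ∧ j = 0 ∧ 0 < i then some ("delete", some ((i : Int) - 1), none) else none
def pvF2 (m k i j : Nat) : Int := if i = 0 ∧ j < k then (j : Int) else pvF1 (m + 1) i j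
def pvG2 (m k i j : Nat) : Option PvOp :=
  if i = 0 ∧ 0 < j ∧ j < k then some ("insert", none, some ((j : Int) - 1)) else pvG1 (m + 1) i j
-- outer / inner loop invariant functions
def pvFo (w1 w2 : List String) (k i j : Nat) : Int :=
  if i ≤ k ∨ j = 0 then pvD w1 w2 i j else 0
def pvGo (w1 w2 : List String) (k i j : Nat) : Option PvOp :=
  if i ≤ k ∨ j = 0 then pvOpF w1 w2 i j else none
def pvFi (w1 w2 : List String) (i c a b : Nat) : Int :=
  if a < i ∨ b = 0 ∨ (a = i ∧ b ≤ c) then pvD w1 w2 a b else 0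
def pvGi (w1 w2 : List String) (i c a b : Nat) : Option PvOp :=
  if a < i ∨ b = 0 ∨ (a = i ∧ b ≤ c) then pvOpF w1 w2 a b else none

theorem pvPhase1 (m n : Nat) (k : Nat) (hk : k ≤ m + 1) :
    (List.range k).foldl pvInitRowStep
        (pvMat m n (fun _ _ => (0 : Int)), pvMat m n (fun _ _ => (none : Option PvOp)))
      = (pvMat m n (pvF1 k), pvMat m n (pvG1 k)) := by
  induction k with
  | zero =>
    simp only [List.range_zero, List.foldl_nil]
    refine Prod.ext ?_ ?_ <;> [skip; skip] <;>
      · apply pvMat_congr; intro i hi j hj; simp [pvF1, pvG1]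
  | succ k ih =>
    rw [List.range_succ, List.foldl_append, ih (by omega), List.foldl_cons, List.foldl_nil]
    unfold pvInitRowStep
    refine Prod.ext ?_ ?_
    · show pvSet2 (pvMat m n (pvF1 k)) k 0 (k : Int) = _
      rw [pvSet2_mat _ _ (by omega) (by omega)]
      apply pvMat_congr; intro i hi j hj
      simp only [pvF1]
      split_ifs <;> simp_all <;> omega
    · show (if 0 < k then pvSet2 (pvMat m n (pvG1 k)) k 0 _ else pvMat m n (pvG1 k)) = _
      by_cases hk0 : 0 < k
      · simp only [hk0, if_true]
        rw [pvSet2_mat _ _ (by omega) (by omega)]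
        apply pvMat_congr; intro i hi j hj
        simp only [pvG1]
        split_ifs <;> simp_all <;> omega
      · simp only [hk0, if_false]
        apply pvMat_congr; intro i hi j hj
        simp only [pvG1]
        split_ifs <;> simp_all <;> omega

theorem pvPhase2 (m n : Nat) (k : Nat) (hk : k ≤ n + 1) :
    (List.range k).foldl pvInitColStep (pvMat m n (pvF1 (m + 1)), pvMat m n (pvG1 (m + 1)))
      = (pvMat m n (pvF2 m k), pvMat m n (pvG2 m k)) := by
  induction k with
  | zero =>
    simp only [List.range_zero, List.foldl_nil]
    refine Prod.ext ?_ ?_ <;>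
      · apply pvMat_congr; intro i hi j hj; simp [pvF2, pvG2]
  | succ k ih =>
    rw [List.range_succ, List.foldl_append, ih (by omega), List.foldl_cons, List.foldl_nil]
    unfold pvInitColStep
    refine Prod.ext ?_ ?_
    · show pvSet2 (pvMat m n (pvF2 m k)) 0 k (k : Int) = _
      rw [pvSet2_mat _ _ (by omega) (by omega)]
      apply pvMat_congr; intro i hi j hj
      simp only [pvF2, pvF1]
      split_ifs <;> simp_all <;> omega
    · show (if 0 < k then pvSet2 (pvMat m n (pvG2 m k)) 0 k _ else pvMat m n (pvG2 m k)) = _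
      by_cases hk0 : 0 < k
      · simp only [hk0, if_true]
        rw [pvSet2_mat _ _ (by omega) (by omega)]
        apply pvMat_congr; intro i hi j hj
        simp only [pvG2, pvG1]
        split_ifs <;> simp_all <;> omega
      · simp only [hk0, if_false]
        apply pvMat_congr; intro i hi j hj
        simp only [pvG2, pvG1]
        split_ifs <;> simp_all <;> omega
theorem pvFi_eq (w1 w2 : List String) {i c a b : Nat}
    (h : a < i ∨ b = 0 ∨ (a = i ∧ b ≤ c)) : pvFi w1 w2 i c a b = pvD w1 w2 a b := by
  simp only [pvFi]; exact if_pos h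

theorem pvCell_step (w1 w2 : List String) {i c : Nat}
    (hi1 : 1 ≤ i) (hiM : i ≤ w1.length) (hc : c + 1 ≤ w2.length) :
    pvCellStep w1 w2
        (pvMat w1.length w2.length (pvFi w1 w2 i c), pvMat w1.length w2.length (pvGi w1 w2 i c))
        i (c + 1)
      = (pvMat w1.length w2.length (pvFi w1 w2 i (c + 1)),
         pvMat w1.length w2.length (pvGi w1 w2 i (c + 1))) := by
  have hD : pvD w1 w2 i (c + 1) = if w1.getD (i - 1) "" = w2.getD c "" then pvD w1 w2 (i - 1) c
      else min (min (pvD w1 w2 (i - 1) c + 1) (pvD w1 w2 (i - 1) (c + 1) + 1))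
               (pvD w1 w2 i c + 1) := by
    simpa using pvD_pos w1 w2 (i := i) (j := c + 1) (by omega) (by omega)
  have hOp : pvOpF w1 w2 i (c + 1) = if w1.getD (i - 1) "" = w2.getD c "" then
        some ("match", some ((i : Int) - 1), some (((c + 1 : Nat) : Int) - 1))
      else if pvD w1 w2 (i - 1) c ≤ pvD w1 w2 (i - 1) (c + 1) ∧
              pvD w1 w2 (i - 1) c ≤ pvD w1 w2 i c then
        some ("substitute", some ((i : Int) - 1), some (((c + 1 : Nat) : Int) - 1))
      else if pvD w1 w2 (i - 1) (c + 1) ≤ pvD w1 w2 i c then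
        some ("delete", some ((i : Int) - 1), none)
      else some ("insert", none, some (((c + 1 : Nat) : Int) - 1)) := by
    unfold pvOpF
    simp only [Nat.add_sub_cancel]
    split_ifs <;> first | rfl | omega | simp_all
  unfold pvCellStep
  simp only [Nat.add_sub_cancel]
  rw [show pvGet2 (pvMat w1.length w2.length (pvFi w1 w2 i c)) 0 (i-1) c = pvD w1 w2 (i-1) c by
        rw [pvGet2_mat _ _ (by omega) (by omega), pvFi_eq _ _ (by omega)]]
  by_cases hw : w1.getD (i - 1) "" = w2.getD c ""
  · simp only [hw, if_true]
    rw [pvSet2_mat _ _ (by omega) (by omega), pvSet2_mat _ _ (by omega) (by omega)]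
    refine Prod.ext ?_ ?_
    · apply pvMat_congr; intro a ha b hb
      simp only [pvFi]
      split_ifs with h1 h2 h2 <;>
        first
        | omega
        | (obtain ⟨rfl, rfl⟩ := h1; rw [hD, if_pos hw])
        | rfl
    · apply pvMat_congr; intro a ha b hb
      simp only [pvGi]
      split_ifs with h1 h2 h2 <;>
        first
        | omega
        | (obtain ⟨rfl, rfl⟩ := h1; rw [hOp, if_pos hw])
        | rfl
  · simp only [hw, if_false]
    rw [show pvGet2 (pvMat w1.length w2.length (pvFi w1 w2 i c)) 0 (i-1) (c+1) = pvD w1 w2 (i-1) (c+1) by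
          rw [pvGet2_mat _ _ (by omega) (by omega), pvFi_eq _ _ (by omega)],
        show pvGet2 (pvMat w1.length w2.length (pvFi w1 w2 i c)) 0 i c = pvD w1 w2 i c by
          rw [pvGet2_mat _ _ (by omega) (by omega), pvFi_eq _ _ (by omega)]]
    set s := pvD w1 w2 (i - 1) c with hs
    set dl := pvD w1 w2 (i - 1) (c + 1) with hdl
    set iv := pvD w1 w2 i c with hiv
    have hbest : pvMinByFst (s + 1, ("substitute", some ((i : Int) - 1), some (((c+1:Nat) : Int) - 1)))
        [(dl + 1, ("delete", some ((i : Int) - 1), none)),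
         (iv + 1, ("insert", none, some (((c+1:Nat) : Int) - 1)))]
        = (pvD w1 w2 i (c + 1),
           (pvOpF w1 w2 i (c + 1)).getD ("", none, none)) := by
      rw [hD, if_neg hw, hOp, if_neg hw]
      simp only [pvMinByFst, List.foldl_cons, List.foldl_nil]
      split_ifs <;> first | rfl | (simp; omega) | simp_all
    rw [hbest]
    rw [pvSet2_mat _ _ (by omega) (by omega), pvSet2_mat _ _ (by omega) (by omega)]
    refine Prod.ext ?_ ?_
    · apply pvMat_congr; intro a ha b hb
      simp only [pvFi]
      split_ifs with h1 h2 h2 <;>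
        first
        | omega
        | (obtain ⟨rfl, rfl⟩ := h1; rfl)
        | rfl
    · apply pvMat_congr; intro a ha b hb
      simp only [pvGi]
      split_ifs with h1 h2 h2 <;>
        first
        | omega
        | (obtain ⟨rfl, rfl⟩ := h1; rw [hOp, if_neg hw]; split_ifs <;> rfl)
        | rfl
theorem pvInner_loop (w1 w2 : List String) {i : Nat} (hi1 : 1 ≤ i) (hiM : i ≤ w1.length) :
    ∀ c d, d + c ≤ w2.length →
    (List.range' (d + 1) c).foldl (fun st j => pvCellStep w1 w2 st i j)
        (pvMat w1.length w2.length (pvFi w1 w2 i d), pvMat w1.length w2.length (pvGi w1 w2 i d))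
      = (pvMat w1.length w2.length (pvFi w1 w2 i (d + c)),
         pvMat w1.length w2.length (pvGi w1 w2 i (d + c))) := by
  intro c
  induction c with
  | zero => intro d hd; simp
  | succ c ih =>
    intro d hd
    rw [List.range'_succ, List.foldl_cons, pvCell_step w1 w2 hi1 hiM (by omega)]
    have := ih (d + 1) (by omega)
    rw [show d + 1 + 1 = d + 2 by omega] at this
    rw [this, show d + 1 + c = d + (c + 1) by omega]

theorem pvOuter_loop (w1 w2 : List String) :
    ∀ c k, k + c ≤ w1.length →
    (List.range' (k + 1) c).foldl
        (fun st i => (List.range' 1 w2.length).foldl (fun st j => pvCellStep w1 w2 st i j) st)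
        (pvMat w1.length w2.length (pvFo w1 w2 k), pvMat w1.length w2.length (pvGo w1 w2 k))
      = (pvMat w1.length w2.length (pvFo w1 w2 (k + c)),
         pvMat w1.length w2.length (pvGo w1 w2 (k + c))) := by
  intro c
  induction c with
  | zero => intro k hk; simp
  | succ c ih =>
    intro k hk
    rw [List.range'_succ, List.foldl_cons]
    have hFo : pvMat w1.length w2.length (pvFo w1 w2 k)
        = pvMat w1.length w2.length (pvFi w1 w2 (k + 1) 0) := by
      apply pvMat_congr; intro a ha b hb; simp only [pvFo, pvFi]
      split_ifs <;> first | rfl | omega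
    have hGo : pvMat w1.length w2.length (pvGo w1 w2 k)
        = pvMat w1.length w2.length (pvGi w1 w2 (k + 1) 0) := by
      apply pvMat_congr; intro a ha b hb; simp only [pvGo, pvGi]
      split_ifs <;> first | rfl | omega
    rw [hFo, hGo]
    have hin := pvInner_loop w1 w2 (i := k + 1) (by omega) (by omega) w2.length 0 (by omega)
    rw [show (0 + 1) = 1 by rfl, show 0 + w2.length = w2.length by omega] at hin
    rw [hin]
    have hFi : pvMat w1.length w2.length (pvFi w1 w2 (k + 1) w2.length)
        = pvMat w1.length w2.length (pvFo w1 w2 (k + 1)) := by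
      apply pvMat_congr; intro a ha b hb; simp only [pvFo, pvFi]
      split_ifs <;> first | rfl | omega
    have hGi : pvMat w1.length w2.length (pvGi w1 w2 (k + 1) w2.length)
        = pvMat w1.length w2.length (pvGo w1 w2 (k + 1)) := by
      apply pvMat_congr; intro a ha b hb; simp only [pvGo, pvGi]
      split_ifs <;> first | rfl | omega
    rw [hFi, hGi]
    have := ih (k + 1) (by omega)
    rw [this, show k + 1 + c = k + (c + 1) by omega]

-- A's whole word_edit_distance: the final state matrices are pvD and pvOpF
theorem pvWedA_eq (w1 w2 : List String) :
    pvWedA w1 w2 = (pvD w1 w2 w1.length w2.length,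
      (pvBackA (pvMat w1.length w2.length (fun a b => pvOpF w1 w2 a b)) (w1.length + w2.length)
        w1.length w2.length).reverse) := by
  unfold pvWedA
  simp only []
  have h0 : (List.replicate (w1.length + 1) (List.replicate (w2.length + 1) (0 : Int)),
      List.replicate (w1.length + 1) (List.replicate (w2.length + 1) (none : Option PvOp)))
      = (pvMat w1.length w2.length (fun _ _ => (0 : Int)),
         pvMat w1.length w2.length (fun _ _ => (none : Option PvOp))) := by
    unfold pvMat
    refine Prod.ext ?_ ?_ <;> simp [List.map_const']
  rw [h0, pvPhase1 w1.length w2.length (w1.length + 1) (by omega),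
      pvPhase2 w1.length w2.length (w2.length + 1) (by omega)]
  have h2 : (pvMat w1.length w2.length (pvF2 w1.length (w2.length + 1)),
        pvMat w1.length w2.length (pvG2 w1.length (w2.length + 1)))
      = (pvMat w1.length w2.length (pvFo w1 w2 0), pvMat w1.length w2.length (pvGo w1 w2 0)) := by
    refine Prod.ext ?_ ?_
    · apply pvMat_congr; intro a ha b hb
      simp only [pvF2, pvF1, pvFo]
      split_ifs <;> first | omega | simp_all [pvD_zero_left, pvD_zero_right]
    · apply pvMat_congr; intro a ha b hb
      simp only [pvG2, pvG1, pvGo, pvOpF]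
      split_ifs <;> first | rfl | omega | simp_all
  rw [h2]
  have h3 := pvOuter_loop w1 w2 w1.length 0 (by omega)
  rw [show (0 + 1) = 1 by rfl, show 0 + w1.length = w1.length by omega] at h3
  rw [h3]
  have hF : pvMat w1.length w2.length (pvFo w1 w2 w1.length)
      = pvMat w1.length w2.length (fun i j => pvD w1 w2 i j) := by
    apply pvMat_congr; intro a ha b hb; simp only [pvFo]
    rw [if_pos (by omega)]
  have hG : pvMat w1.length w2.length (pvGo w1 w2 w1.length)
      = pvMat w1.length w2.length (fun i j => pvOpF w1 w2 i j) := by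
    apply pvMat_congr; intro a ha b hb; simp only [pvGo]
    rw [if_pos (by omega)]
  rw [hF, hG, pvGet2_mat _ _ (by omega) (by omega)]

theorem pvFetch_in (xs : List String) (j : Nat) (h1 : 1 ≤ j) (h2 : j ≤ xs.length) :
    pvFetch xs (some ((j : Int) - 1)) = some (xs.getD (j - 1) "") := by
  unfold pvFetch
  show PySem.List.pyGet? xs ((j : Int) - 1) = _
  have hc : ((j : Int) - 1) = ((j - 1 : Nat) : Int) := by omega
  rw [hc, PySem.List.pyGet?_natCast]
  rw [List.getElem?_eq_getElem (by omega), List.getD_eq_getElem?_getD,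
      List.getElem?_eq_getElem (by omega)]
  rfl

-- B's per-cell value as a pure recursion: (cost, chain of aligned entries, most recent first)
def pvC (w1 w2 : List String) : Nat → Nat → PvCell
  | 0, 0 => (0, [])
  | 0, j + 1 =>
    let p := pvC w1 w2 0 j
    (p.1 + 1, some (w2.getD j "") :: p.2)
  | i + 1, 0 =>
    let p := pvC w1 w2 i 0
    (p.1 + 1, none :: p.2)
  | i + 1, j + 1 =>
    if w1.getD i "" = w2.getD j "" then
      let p := pvC w1 w2 i j
      (p.1, some (w2.getD j "") :: p.2)
    else
      let s := pvC w1 w2 i j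
      let d := pvC w1 w2 i (j + 1)
      let l := pvC w1 w2 (i + 1) j
      if s.1 ≤ d.1 ∧ s.1 ≤ l.1 then (s.1 + 1, some (w2.getD j "") :: s.2)
      else if d.1 ≤ l.1 then (d.1 + 1, none :: d.2)
      else (l.1 + 1, some (w2.getD j "") :: l.2)
termination_by i j => i + j

-- the key bridge: B's cell value = (A's dp value, A's backtrack path mapped to aligned entries)
theorem pvC_eq (w1 w2 : List String) :
    ∀ fuel i j, i + j ≤ fuel → i ≤ w1.length → j ≤ w2.length →
    pvC w1 w2 i j
      = (pvD w1 w2 i j,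
         (pvBackA (pvMat w1.length w2.length (fun a b => pvOpF w1 w2 a b)) fuel i j).map
           (pvEnt w2)) := by
  intro fuel
  induction fuel with
  | zero =>
    intro i j hf hi hj
    have h0 : i = 0 ∧ j = 0 := by omega
    obtain ⟨rfl, rfl⟩ := h0
    simp [pvC, pvD, pvBackA]
  | succ fuel ih =>
    intro i j hf hi hj
    match i, j with
    | 0, 0 => simp [pvC, pvD, pvBackA]
    | 0, j + 1 =>
      have hop : pvGet2 (pvMat w1.length w2.length (fun a b => pvOpF w1 w2 a b)) none 0 (j + 1)
          = pvOpF w1 w2 0 (j + 1) := pvGet2_mat _ _ (by omega) hj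
      have hopf : pvOpF w1 w2 0 (j + 1) = some ("insert", none, some (((j + 1 : Nat) : Int) - 1)) := by
        unfold pvOpF; split_ifs <;> first | rfl | omega | simp_all
      have hrec := ih 0 j (by omega) (by omega) (by omega)
      simp only [pvBackA, hop, hopf, Nat.add_sub_cancel]
      rw [if_neg (by simp), if_neg (by simp), if_pos (by simp)]
      rw [show pvC w1 w2 0 (j + 1)
            = ((pvC w1 w2 0 j).1 + 1, some (w2.getD j "") :: (pvC w1 w2 0 j).2) from by
          simp [pvC]]
      rw [hrec, List.map_cons]
      refine Prod.ext ?_ ?_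
      · simp [pvD_zero_left]
      · refine congrArg₂ List.cons ?_ rfl
        unfold pvEnt
        rw [if_neg (by simp), pvFetch_in w2 (j + 1) (by omega) (by omega), Nat.add_sub_cancel]
    | i + 1, 0 =>
      have hop : pvGet2 (pvMat w1.length w2.length (fun a b => pvOpF w1 w2 a b)) none (i + 1) 0
          = pvOpF w1 w2 (i + 1) 0 := pvGet2_mat _ _ hi (by omega)
      have hopf : pvOpF w1 w2 (i + 1) 0 = some ("delete", some (((i + 1 : Nat) : Int) - 1), none) := by
        unfold pvOpF; split_ifs <;> first | rfl | omega | simp_all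
      have hrec := ih i 0 (by omega) (by omega) (by omega)
      simp only [pvBackA, hop, hopf, Nat.add_sub_cancel]
      rw [if_neg (by simp), if_pos (by simp)]
      rw [show pvC w1 w2 (i + 1) 0
            = ((pvC w1 w2 i 0).1 + 1, none :: (pvC w1 w2 i 0).2) from by simp [pvC]]
      rw [hrec, List.map_cons]
      refine Prod.ext ?_ ?_
      · simp [pvD_zero_right]
      · refine congrArg₂ List.cons ?_ rfl
        unfold pvEnt
        rw [if_pos (by simp)]
    | i + 1, j + 1 =>
      have hop : pvGet2 (pvMat w1.length w2.length (fun a b => pvOpF w1 w2 a b)) none (i + 1) (j + 1)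
          = pvOpF w1 w2 (i + 1) (j + 1) := pvGet2_mat _ _ hi hj
      have hij := ih i j (by omega) (by omega) (by omega)
      have hdl := ih i (j + 1) (by omega) (by omega) hj
      have hin := ih (i + 1) j (by omega) hi (by omega)
      by_cases hw : w1.getD i "" = w2.getD j ""
      · have hopf : pvOpF w1 w2 (i + 1) (j + 1)
            = some ("match", some (((i + 1 : Nat) : Int) - 1), some (((j + 1 : Nat) : Int) - 1)) := by
          unfold pvOpF
          simp only [Nat.add_sub_cancel]
          split_ifs <;> first | rfl | omega | simp_all
        simp only [pvBackA, hop, hopf, Nat.add_sub_cancel]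
        rw [if_pos (by simp)]
        rw [show pvC w1 w2 (i + 1) (j + 1)
              = ((pvC w1 w2 i j).1, some (w2.getD j "") :: (pvC w1 w2 i j).2) from by
            simp only [pvC]; rw [if_pos hw]]
        rw [hij, List.map_cons]
        refine Prod.ext ?_ ?_
        · have := pvD_pos w1 w2 (i := i + 1) (j := j + 1) (by omega) (by omega)
          simp only [Nat.add_sub_cancel] at this
          rw [this, if_pos hw]
        · refine congrArg₂ List.cons ?_ rfl
          unfold pvEnt
          rw [if_neg (by simp), pvFetch_in w2 (j + 1) (by omega) (by omega), Nat.add_sub_cancel]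
      · have hcur := pvD_pos w1 w2 (i := i + 1) (j := j + 1) (by omega) (by omega)
        simp only [Nat.add_sub_cancel] at hcur
        rw [if_neg hw] at hcur
        have hC : pvC w1 w2 (i + 1) (j + 1)
            = (if (pvC w1 w2 i j).1 ≤ (pvC w1 w2 i (j + 1)).1 ∧
                  (pvC w1 w2 i j).1 ≤ (pvC w1 w2 (i + 1) j).1 then
                ((pvC w1 w2 i j).1 + 1, some (w2.getD j "") :: (pvC w1 w2 i j).2)
              else if (pvC w1 w2 i (j + 1)).1 ≤ (pvC w1 w2 (i + 1) j).1 then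
                ((pvC w1 w2 i (j + 1)).1 + 1, none :: (pvC w1 w2 i (j + 1)).2)
              else ((pvC w1 w2 (i + 1) j).1 + 1, some (w2.getD j "") :: (pvC w1 w2 (i + 1) j).2)) := by
          simp only [pvC]; rw [if_neg hw]
        rw [hC, hij, hdl, hin]
        simp only []
        by_cases hsub : pvD w1 w2 i j ≤ pvD w1 w2 i (j + 1) ∧ pvD w1 w2 i j ≤ pvD w1 w2 (i + 1) j
        · have hopf : pvOpF w1 w2 (i + 1) (j + 1)
              = some ("substitute", some (((i + 1 : Nat) : Int) - 1), some (((j + 1 : Nat) : Int) - 1)) := by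
            unfold pvOpF
            simp only [Nat.add_sub_cancel]
            split_ifs <;> first | rfl | omega | simp_all
          rw [if_pos hsub]
          simp only [pvBackA, hop, hopf, Nat.add_sub_cancel]
          rw [if_pos (by simp), List.map_cons]
          refine Prod.ext ?_ ?_
          · rw [hcur]; omega
          · refine congrArg₂ List.cons ?_ rfl
            unfold pvEnt
            rw [if_neg (by simp), pvFetch_in w2 (j + 1) (by omega) (by omega), Nat.add_sub_cancel]
        · rw [if_neg hsub]
          by_cases hdel : pvD w1 w2 i (j + 1) ≤ pvD w1 w2 (i + 1) j
          · have hopf : pvOpF w1 w2 (i + 1) (j + 1)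
                = some ("delete", some (((i + 1 : Nat) : Int) - 1), none) := by
              unfold pvOpF
              simp only [Nat.add_sub_cancel]
              split_ifs <;> first | rfl | omega | simp_all
            rw [if_pos hdel]
            simp only [pvBackA, hop, hopf, Nat.add_sub_cancel]
            rw [if_neg (by simp), if_pos (by simp), List.map_cons]
            refine Prod.ext ?_ ?_
            · rw [hcur]; omega
            · refine congrArg₂ List.cons ?_ rfl
              unfold pvEnt
              rw [if_pos (by simp)]
          · have hopf : pvOpF w1 w2 (i + 1) (j + 1)
                = some ("insert", none, some (((j + 1 : Nat) : Int) - 1)) := by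
              unfold pvOpF
              simp only [Nat.add_sub_cancel]
              split_ifs <;> first | rfl | omega | simp_all
            rw [if_neg hdel]
            simp only [pvBackA, hop, hopf, Nat.add_sub_cancel]
            rw [if_neg (by simp), if_neg (by simp), if_pos (by simp), List.map_cons]
            refine Prod.ext ?_ ?_
            · rw [hcur]; omega
            · refine congrArg₂ List.cons ?_ rfl
              unfold pvEnt
              rw [if_neg (by simp), pvFetch_in w2 (j + 1) (by omega) (by omega), Nat.add_sub_cancel]

-- getD of a mapped range
theorem pvGetD_map_range {α : Type} {n k : Nat} (f : Nat → α) (d : α) (h : k < n) :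
    ((List.range n).map f).getD k d = f k := by
  simp [List.getD_eq_getElem?_getD, h]

-- row 0 of B's table
theorem pvRow0_loop (ref seq : List String) :
    ∀ c, c ≤ seq.length →
    (List.range' 1 c).foldl (pvCell0 seq) ([pvC ref seq 0 0], pvC ref seq 0 0)
      = ((List.range (c + 1)).map (pvC ref seq 0), pvC ref seq 0 c) := by
  intro c
  induction c with
  | zero =>
    intro _
    simp [List.range_succ]
  | succ c ih =>
    intro hc
    rw [show (1 : Nat) = 0 + 1 by rfl, List.range'_concat, List.foldl_append,
        ih (by omega), List.foldl_cons, List.foldl_nil]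
    unfold pvCell0
    simp only [zero_add, one_mul, Nat.add_sub_cancel_left]
    have hcell : ((pvC ref seq 0 c).1 + 1, some (seq.getD c "") :: (pvC ref seq 0 c).2)
        = pvC ref seq 0 (c + 1) := by
      simp [pvC]
    rw [hcell]
    refine Prod.ext ?_ rfl
    rw [List.range_succ (n := c + 1), List.map_append]
    rfl

theorem pvRow0_eq (ref seq : List String) :
    (pvRow0 seq).1 = (List.range (seq.length + 1)).map (pvC ref seq 0) := by
  unfold pvRow0
  have h00 : (([((0 : Int), ([] : List (Option String)))], ((0 : Int), ([] : List (Option String))))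
        : List PvCell × PvCell)
      = ([pvC ref seq 0 0], pvC ref seq 0 0) := by
    simp [pvC]
  rw [h00, pvRow0_loop ref seq seq.length (by omega)]

-- row i+1 of B's table from row i
theorem pvRowB_loop (ref seq : List String) (i : Nat) (hi : i < ref.length) :
    ∀ c, c ≤ seq.length →
    (List.range' 1 c).foldl
        (pvCellB ref seq ((List.range (seq.length + 1)).map (pvC ref seq i)) (i + 1))
        ([pvC ref seq (i + 1) 0], pvC ref seq (i + 1) 0)
      = ((List.range (c + 1)).map (pvC ref seq (i + 1)), pvC ref seq (i + 1) c) := by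
  intro c
  induction c with
  | zero =>
    intro _
    simp [List.range_succ]
  | succ c ih =>
    intro hc
    rw [show (1 : Nat) = 0 + 1 by rfl, List.range'_concat, List.foldl_append,
        ih (by omega), List.foldl_cons, List.foldl_nil]
    unfold pvCellB
    simp only [zero_add, one_mul, Nat.add_sub_cancel_left, Nat.add_sub_cancel]
    have egs : ((List.range (seq.length + 1)).map (pvC ref seq i)).getD c (0, [])
        = pvC ref seq i c := pvGetD_map_range _ _ (by omega)
    have egd : ((List.range (seq.length + 1)).map (pvC ref seq i)).getD (1 + c) (0, [])
        = pvC ref seq i (c + 1) := by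
      rw [show 1 + c = c + 1 by omega]; exact pvGetD_map_range _ _ (by omega)
    have egl : ((List.range (c + 1)).map (pvC ref seq (i + 1))).getD c (0, [])
        = pvC ref seq (i + 1) c := pvGetD_map_range _ _ (by omega)
    rw [egs, egd, egl]
    have hcell : (if ref.getD i "" = seq.getD c "" then
          ((pvC ref seq i c).1, some (seq.getD c "") :: (pvC ref seq i c).2)
        else
          if (pvC ref seq i c).1 ≤ (pvC ref seq i (c + 1)).1 ∧
             (pvC ref seq i c).1 ≤ (pvC ref seq (i + 1) c).1 then
            ((pvC ref seq i c).1 + 1, some (seq.getD c "") :: (pvC ref seq i c).2)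
          else if (pvC ref seq i (c + 1)).1 ≤ (pvC ref seq (i + 1) c).1 then
            ((pvC ref seq i (c + 1)).1 + 1, none :: (pvC ref seq i (c + 1)).2)
          else ((pvC ref seq (i + 1) c).1 + 1, some (seq.getD c "") :: (pvC ref seq (i + 1) c).2))
        = pvC ref seq (i + 1) (c + 1) := by
      rw [show pvC ref seq (i + 1) (c + 1)
            = (if ref.getD i "" = seq.getD c "" then
                ((pvC ref seq i c).1, some (seq.getD c "") :: (pvC ref seq i c).2)
              else
                if (pvC ref seq i c).1 ≤ (pvC ref seq i (c + 1)).1 ∧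
                   (pvC ref seq i c).1 ≤ (pvC ref seq (i + 1) c).1 then
                  ((pvC ref seq i c).1 + 1, some (seq.getD c "") :: (pvC ref seq i c).2)
                else if (pvC ref seq i (c + 1)).1 ≤ (pvC ref seq (i + 1) c).1 then
                  ((pvC ref seq i (c + 1)).1 + 1, none :: (pvC ref seq i (c + 1)).2)
                else ((pvC ref seq (i + 1) c).1 + 1, some (seq.getD c "") :: (pvC ref seq (i + 1) c).2))
          from by simp only [pvC]]
    rw [hcell]
    refine Prod.ext ?_ rfl
    rw [List.range_succ (n := c + 1), List.map_append]
    rfl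

theorem pvRowB_eq (ref seq : List String) (i : Nat) (hi : i < ref.length) :
    pvRowB ref seq ((List.range (seq.length + 1)).map (pvC ref seq i)) (i + 1)
      = (List.range (seq.length + 1)).map (pvC ref seq (i + 1)) := by
  unfold pvRowB
  simp only []
  have eg0 : ((List.range (seq.length + 1)).map (pvC ref seq i)).getD 0 (0, [])
      = pvC ref seq i 0 := pvGetD_map_range _ _ (by omega)
  have hc0 : (((((List.range (seq.length + 1)).map (pvC ref seq i)).getD 0 (0, [])).1 + 1,
        none :: (((List.range (seq.length + 1)).map (pvC ref seq i)).getD 0 (0, [])).2) : PvCell)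
      = pvC ref seq (i + 1) 0 := by
    rw [eg0]
    simp [pvC]
  rw [hc0, pvRowB_loop ref seq i hi seq.length (le_refl _)]

-- B's whole row computation
theorem pvRows_loop (ref seq : List String) :
    ∀ c, c ≤ ref.length →
    (List.range' 1 c).foldl (fun r i => pvRowB ref seq r i)
        ((List.range (seq.length + 1)).map (pvC ref seq 0))
      = (List.range (seq.length + 1)).map (pvC ref seq c) := by
  intro c
  induction c with
  | zero => intro _; simp
  | succ c ih =>
    intro hc
    rw [show (1 : Nat) = 0 + 1 by rfl, List.range'_concat, List.foldl_append,
        ih (by omega), List.foldl_cons, List.foldl_nil]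
    simp only [zero_add, one_mul]
    rw [show 1 + c = c + 1 by omega]
    exact pvRowB_eq ref seq c (by omega)

-- B's aligned row equals A's padded/truncated aligned row
theorem pvOpF_tag (w1 w2 : List String) (i j : Nat) (op : PvOp)
    (h : pvOpF w1 w2 i j = some op) :
    op.1 = "match" ∨ op.1 = "substitute" ∨ op.1 = "delete" ∨ op.1 = "insert" := by
  unfold pvOpF at h
  split_ifs at h <;> first | exact Option.noConfusion h | (injection h with h; subst h; simp)

theorem pvBackA_tags (w1 w2 : List String) :
    ∀ fuel i j, i ≤ w1.length → j ≤ w2.length →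
    ∀ op ∈ pvBackA (pvMat w1.length w2.length (fun a b => pvOpF w1 w2 a b)) fuel i j,
    op.1 = "match" ∨ op.1 = "substitute" ∨ op.1 = "delete" ∨ op.1 = "insert" := by
  intro fuel
  induction fuel with
  | zero =>
    intro i j hi hj op hop
    cases i <;> cases j <;> simp [pvBackA] at hop
  | succ fuel ih =>
    intro i j hi hj op hop
    have hstep : ∀ (a b : Nat), a ≤ w1.length → b ≤ w2.length →
        op ∈ pvBackA (pvMat w1.length w2.length (fun a b => pvOpF w1 w2 a b)) fuel a b →
        op.1 = "match" ∨ op.1 = "substitute" ∨ op.1 = "delete" ∨ op.1 = "insert" :=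
      fun a b ha hb => ih a b ha hb op
    match i, j with
    | 0, 0 => simp [pvBackA] at hop
    | 0, j + 1 =>
      have hc : pvGet2 (pvMat w1.length w2.length (fun a b => pvOpF w1 w2 a b)) none 0 (j + 1)
          = pvOpF w1 w2 0 (j + 1) := pvGet2_mat _ _ (by omega) hj
      simp only [pvBackA, hc] at hop
      cases hcell : pvOpF w1 w2 0 (j + 1) with
      | none => rw [hcell] at hop; simp at hop
      | some o =>
        rw [hcell] at hop
        dsimp only at hop
        split_ifs at hop
        all_goals
          first
          | (simp only [List.mem_cons] at hop
             rcases hop with rfl | hop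
             · exact pvOpF_tag w1 w2 0 (j + 1) op hcell
             · exact hstep _ _ (by omega) (by omega) hop)
          | exact absurd hop (by simp)
    | i + 1, 0 =>
      have hc : pvGet2 (pvMat w1.length w2.length (fun a b => pvOpF w1 w2 a b)) none (i + 1) 0
          = pvOpF w1 w2 (i + 1) 0 := pvGet2_mat _ _ hi (by omega)
      simp only [pvBackA, hc] at hop
      cases hcell : pvOpF w1 w2 (i + 1) 0 with
      | none => rw [hcell] at hop; simp at hop
      | some o =>
        rw [hcell] at hop
        dsimp only at hop
        split_ifs at hop
        all_goals
          first
          | (simp only [List.mem_cons] at hop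
             rcases hop with rfl | hop
             · exact pvOpF_tag w1 w2 (i + 1) 0 op hcell
             · exact hstep _ _ (by omega) (by omega) hop)
          | exact absurd hop (by simp)
    | i + 1, j + 1 =>
      have hc : pvGet2 (pvMat w1.length w2.length (fun a b => pvOpF w1 w2 a b)) none (i + 1) (j + 1)
          = pvOpF w1 w2 (i + 1) (j + 1) := pvGet2_mat _ _ hi hj
      simp only [pvBackA, hc] at hop
      cases hcell : pvOpF w1 w2 (i + 1) (j + 1) with
      | none => rw [hcell] at hop; simp at hop
      | some o =>
        rw [hcell] at hop
        dsimp only at hop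
        split_ifs at hop
        all_goals
          first
          | (simp only [List.mem_cons] at hop
             rcases hop with rfl | hop
             · exact pvOpF_tag w1 w2 (i + 1) (j + 1) op hcell
             · exact hstep _ _ (by omega) (by omega) hop)
          | exact absurd hop (by simp)

theorem pvFoldA_map (seq : List String) :
    ∀ (L : List PvOp) (acc : List (Option String)),
    (∀ op ∈ L, op.1 = "match" ∨ op.1 = "substitute" ∨ op.1 = "delete" ∨ op.1 = "insert") →
    L.foldl (pvAlignedStep seq) acc = acc ++ L.map (pvEnt seq) := by
  intro L
  induction L with
  | nil => intro acc _; simp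
  | cons op L ih =>
    intro acc h
    rw [List.foldl_cons, List.map_cons, ih _ (fun o ho => h o (by simp [ho]))]
    have htag := h op (by simp)
    rcases htag with h1 | h1 | h1 | h1 <;>
      · rw [show pvAlignedStep seq acc op = acc ++ [pvEnt seq op] by
          unfold pvAlignedStep pvEnt; rw [h1]; simp]
        simp

-- A's aligned list (before padding) = B's reversed chain
theorem pvRow_eq (ref seq : List String) :
    ((pvWedA ref seq).2).foldl (pvAlignedStep seq) []
      = ((List.range' 1 ref.length).foldl (fun r i => pvRowB ref seq r i) (pvRow0 seq).1
          |>.getD seq.length (0, [])).2.reverse := by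
  rw [pvRow0_eq ref seq, pvRows_loop ref seq ref.length (by omega)]
  rw [pvGetD_map_range _ _ (by omega)]
  rw [pvC_eq ref seq (ref.length + seq.length) ref.length seq.length (by omega) (by omega) (by omega)]
  rw [pvWedA_eq]
  rw [pvFoldA_map seq _ []
      (fun op hop => pvBackA_tags ref seq (ref.length + seq.length) ref.length seq.length
        (le_refl _) (le_refl _) op (List.mem_reverse.mp hop))]
  simp [List.map_reverse]

-- ===== VERDICT (by name: the statement is the Claim_ definition above) =====
theorem align_multiple_sequences_spec : Claim_equal_align_multiple_sequences := by
  unfold Claim_equal_align_multiple_sequences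
  intro sequences reference _
  unfold Spec_align_multiple_sequences
  unfold align_multiple_sequences align_multiple_sequences_alt
  simp only []
  cases sequences with
  | nil => simp
  | cons s ss =>
    rw [if_neg (by simp)]
    have hfun : (fun (all : List (List (Option String))) (seq : List String) =>
        all ++ [((((pvWedA reference seq).2).foldl (pvAlignedStep seq) []) ++
          List.replicate (reference.length -
            (((pvWedA reference seq).2).foldl (pvAlignedStep seq) []).length) none).take
              reference.length])
        = (fun (result : List (List (Option String))) (seq : List String) =>
            result ++ [pvAlignedRowB reference seq]) := by
      funext all seq
      unfold pvAlignedRowB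
      simp only []
      rw [pvRow_eq reference seq]
    rw [hfun]
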